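-- pv_equiv track=rewrite | github.com/Y4tacker/Web-Security | CommonlyUsedScripts/编码/Anynum.py | getNumber3
-- ===== SOURCE A (Python) =====
-- def getNumber3(number):
--     number = int(number)
--     if number in [-2, -1, 0, 1]:
--         return ["~int((len(str(None))/len(str(None))))", "~int(len(str()))",
--                 "int(len(str()))", "int((len(str(None))/len(str(None))))"][number + 2]
--
--     if number % 2:
--         return "~%s" % getNumber3(~number)
--     else:
--         return "(%s<<(int((len(str(None))/len(str(None))))))" % getNumber3(number / 2)
-- ===== SOURCE B (Python) =====
-- def getNumber3(number):
--     number = int(number)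
--     wrappers = []
--     while number not in (-2, -1, 0, 1):
--         if number % 2:
--             wrappers.append(True)
--             number = ~number
--         else:
--             wrappers.append(False)
--             number = int(number / 2)
--     s = ["~int((len(str(None))/len(str(None))))", "~int(len(str()))",
--          "int(len(str()))", "int((len(str(None))/len(str(None))))"][number + 2]
--     for w in reversed(wrappers):
--         if w:
--             s = "~" + s
--         else:
--             s = "(%s<<(int((len(str(None))/len(str(None))))))" % s
--     return s
-- ===== Notes on version B (the rewrite author's own statement) =====
-- stated objective: alternative
-- what changed: Replaces A's string-building recursion by an explicit while loop that only records the sequence of '~'/'<<' wrapper markers and halves/complements the number, then rebuilds the string once by folding the recorded wrappers (innermost first) around the base-table entry.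
import Mathlib
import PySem

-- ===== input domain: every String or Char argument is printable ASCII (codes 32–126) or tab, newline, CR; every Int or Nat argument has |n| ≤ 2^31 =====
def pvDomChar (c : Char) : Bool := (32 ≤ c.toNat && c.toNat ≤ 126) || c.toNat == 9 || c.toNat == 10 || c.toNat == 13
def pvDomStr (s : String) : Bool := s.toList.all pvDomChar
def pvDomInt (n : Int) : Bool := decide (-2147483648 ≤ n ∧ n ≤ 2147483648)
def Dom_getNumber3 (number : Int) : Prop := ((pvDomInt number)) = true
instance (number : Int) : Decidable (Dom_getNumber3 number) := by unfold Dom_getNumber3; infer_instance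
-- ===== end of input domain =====

-- B replaces A's string-building recursion by an explicit loop that records the '~'/'<<'-wrappers,
-- then rebuilds the string from the base table by folding the recorded wrappers (objective: alternative).


-- fuel bound shared by both ports: strictly decreases at each step of the recursion/loop
-- (the odd step may grow |n| by 1 but flips it even-negative; the constants absorb that),
-- so 'pvMeasure n + 1' units of fuel always suffice and the fuel-out branch is unreachable
def pvMeasure (n : Int) : Nat :=
  5 * n.natAbs + (if n % 2 ≠ 0 then (if 0 < n then 6 else 0) else (if 0 < n then 2 else 0))

-- the 4-element base table, indexed by number+2 (number ∈ {-2,-1,0,1})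
def pvTable (n : Int) : String :=
  if n = -2 then "~int((len(str(None))/len(str(None))))"
  else if n = -1 then "~int(len(str()))"
  else if n = 0 then "int(len(str()))"
  else "int((len(str(None))/len(str(None))))"

-- ===== PORT A =====
-- 'int(number)' is the identity on an Int argument; '~number' is -number-1;
-- 'number % 2' truthy = PySem.Int.mod number 2 ≠ 0; in the even branch Python's
-- float division number/2 followed by int() is the exact integer number/2.
-- The fuel only makes the recursion total; pvGoA_fuel_mono below shows it never runs out.
def pvGoA (fuel : Nat) (n : Int) : String :=
  match fuel with
  | 0 => ""
  | fuel + 1 =>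
    if n = -2 ∨ n = -1 ∨ n = 0 ∨ n = 1 then
      pvTable n
    else if PySem.Int.mod n 2 ≠ 0 then
      "~" ++ pvGoA fuel (-n - 1)
    else
      "(" ++ pvGoA fuel (n / 2) ++ "<<(int((len(str(None))/len(str(None))))))"

def getNumber3 (number : Int) : String := pvGoA (pvMeasure number + 1) number

-- ===== PORT B =====
-- the while loop: accumulates the wrapper markers (true = '~', false = '<<')
-- in append order (outermost first) and returns them with the base number
def pvGoB (fuel : Nat) (n : Int) (wrappers : List Bool) : List Bool × Int :=
  match fuel with
  | 0 => (wrappers, n)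
  | fuel + 1 =>
    if n = -2 ∨ n = -1 ∨ n = 0 ∨ n = 1 then
      (wrappers, n)
    else if PySem.Int.mod n 2 ≠ 0 then
      pvGoB fuel (-n - 1) (wrappers ++ [true])
    else
      pvGoB fuel (n / 2) (wrappers ++ [false])

-- one wrapper applied around an already-built string
def pvWrap (s : String) (w : Bool) : String :=
  if w then "~" ++ s
  else "(" ++ s ++ "<<(int((len(str(None))/len(str(None))))))"

def getNumber3_alt (number : Int) : String :=
  let (ws, b) := pvGoB (pvMeasure number + 1) number []
  ws.reverse.foldl pvWrap (pvTable b)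

-- ===== PRECONDITION & SPEC =====
def Spec_getNumber3 (number : Int) (out : String) : Prop := out = getNumber3_alt number
instance (number : Int) (out : String) : Decidable (Spec_getNumber3 number out) := by unfold Spec_getNumber3; infer_instance

-- ===== CLAIM (what is proved, stated in full; the proofs are below) =====
def Claim_equal_getNumber3 : Prop := ∀ (number : Int), Dom_getNumber3 number → Spec_getNumber3 number (getNumber3 number)

-- ===== LEMMAS AND PROOFS =====

theorem pvMeasure_not (n : Int) (ho : PySem.Int.mod n 2 ≠ 0) :
    pvMeasure (-n - 1) < pvMeasure n := by
  rw [PySem.Int.mod_eq_emod_of_pos (by norm_num)] at ho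
  simp only [pvMeasure]; split_ifs <;> omega

theorem pvMeasure_half (n : Int) (h : ¬(n = -2 ∨ n = -1 ∨ n = 0 ∨ n = 1))
    (ho : ¬ PySem.Int.mod n 2 ≠ 0) : pvMeasure (n / 2) < pvMeasure n := by
  rw [PySem.Int.mod_eq_emod_of_pos (by norm_num)] at ho
  simp only [pvMeasure]; split_ifs <;> omega

-- loop invariant: with enough fuel, folding the loop's output equals
-- the pending-accumulator fold of A's result
theorem pvGoB_fold : ∀ (fuel : Nat) (n : Int) (acc : List Bool), pvMeasure n < fuel →
    ((pvGoB fuel n acc).1.reverse.foldl pvWrap (pvTable (pvGoB fuel n acc).2))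
      = acc.reverse.foldl pvWrap (pvGoA fuel n) := by
  intro fuel
  induction fuel with
  | zero => intro n acc hf; omega
  | succ fuel ih =>
      intro n acc hf
      by_cases h : n = -2 ∨ n = -1 ∨ n = 0 ∨ n = 1
      · simp [pvGoB, pvGoA, h]
      · by_cases ho : PySem.Int.mod n 2 ≠ 0
        · have hm := pvMeasure_not n ho
          rw [pvGoB, pvGoA]
          rw [if_neg h, if_neg h, if_pos ho, if_pos ho, ih (-n - 1) (acc ++ [true]) (by omega)]
          simp [pvWrap]
        · have hm := pvMeasure_half n h ho
          rw [pvGoB, pvGoA]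
          rw [if_neg h, if_neg h, if_neg ho, if_neg ho, ih (n / 2) (acc ++ [false]) (by omega)]
          simp [pvWrap]

-- ===== VERDICT (by name: the statement is the Claim_ definition above) =====
theorem getNumber3_spec : Claim_equal_getNumber3 := by
  intro number _
  unfold Spec_getNumber3 getNumber3_alt getNumber3
  have h := pvGoB_fold (pvMeasure number + 1) number [] (by omega)
  simpa using h.symm
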